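-- pv_equiv track=rewrite | github.com/DuongVu101498/codility-solutions | Arrays/CyclicRotation.py | solution
-- ===== SOURCE A (Python) =====
-- def solution(A, K):
--     temp_array = [0] * len(A)
--     rotate_index = [0] * len(A)
--     for i in range (0, len(A)):
--         rotate_index[i] =  (i  + K) % len(A)
--     for i in range (0, len(A)):
--         temp_array[rotate_index[i]] = A[i]
--     return temp_array
-- ===== SOURCE B (Python) =====
-- def solution(A, K):
--     n = len(A)
--     if n == 0:
--         return []
--     s = n - K % n
--     return A[s:] + A[:s]
-- ===== Notes on version B (the rewrite author's own statement) =====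
-- stated objective: idiomatic
-- what changed: Replaces the rotate_index array and per-element modulo scatter with a single split point and one slice-and-concatenate.
import Mathlib
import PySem

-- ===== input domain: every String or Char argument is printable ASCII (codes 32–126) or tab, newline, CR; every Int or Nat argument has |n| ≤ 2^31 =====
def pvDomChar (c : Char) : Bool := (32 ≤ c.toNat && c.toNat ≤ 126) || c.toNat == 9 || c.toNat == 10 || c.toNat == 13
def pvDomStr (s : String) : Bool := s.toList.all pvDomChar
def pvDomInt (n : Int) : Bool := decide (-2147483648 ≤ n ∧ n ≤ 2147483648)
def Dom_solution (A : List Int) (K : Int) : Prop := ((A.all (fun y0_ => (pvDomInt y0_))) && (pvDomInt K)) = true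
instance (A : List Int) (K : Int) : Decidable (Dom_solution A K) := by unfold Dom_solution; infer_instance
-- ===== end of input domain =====

-- B replaces A's rotate_index array and per-element modulo scatter with one split point
-- and a slice-and-concatenate (idiomatic rewrite; return values proved equal).

-- ===== PORT A =====
-- temp_array[rotate_index[i]] = A[i]: the index (i+K) % len(A) is a Python mod of a
-- positive divisor, hence nonnegative and < len(A), so .toNat is exact here.
def solution (A : List Int) (K : Int) : List Int :=
  let n := A.length
  let rotate_index := (List.range n).map (fun (i : Nat) => PySem.Int.mod ((i : Int) + K) (n : Int))
  (List.range n).foldl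
    (fun temp i => temp.set (rotate_index.getD i 0).toNat (A.getD i 0))
    (List.replicate n (0 : Int))

-- ===== PORT B =====
def solution_alt (A : List Int) (K : Int) : List Int :=
  if A.length = 0 then []
  else
    let s := (A.length : Int) - PySem.Int.mod K (A.length : Int)
    PySem.List.slice A (some s) none ++ PySem.List.slice A none (some s)

-- ===== PRECONDITION & SPEC =====
def Spec_solution (A : List Int) (K : Int) (out : List Int) : Prop := out = solution_alt A K
instance (A : List Int) (K : Int) (out : List Int) : Decidable (Spec_solution A K out) := by unfold Spec_solution; infer_instance

-- ===== CLAIM (what is proved, stated in full; the proofs are below) =====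
def Claim_equal_solution : Prop := ∀ (A : List Int) (K : Int), Dom_solution A K → Spec_solution A K (solution A K)

-- ===== LEMMAS AND PROOFS =====

-- length is preserved by the scatter loop
theorem pv_foldl_set_length (l : List Nat) (f : Nat → Nat) (g : Nat → Int) (init : List Int) :
    (l.foldl (fun t i => t.set (f i) (g i)) init).length = init.length := by
  induction l generalizing init with
  | nil => rfl
  | cons j l ih => simp [List.foldl_cons, ih]

-- positions never written keep their value
theorem pv_foldl_set_untouched (l : List Nat) (f : Nat → Nat) (g : Nat → Int) (init : List Int)
    (p : Nat) (hp : p ∉ l.map f) :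
    (l.foldl (fun t i => t.set (f i) (g i)) init)[p]? = init[p]? := by
  induction l generalizing init with
  | nil => rfl
  | cons j l ih =>
    simp only [List.map_cons, List.mem_cons, not_or] at hp
    rw [List.foldl_cons, ih _ hp.2, List.getElem?_set_ne (fun h => hp.1 h.symm)]

-- with pairwise-distinct targets, position f i holds g i
theorem pv_foldl_set_hit (l : List Nat) (f : Nat → Nat) (g : Nat → Int) (init : List Int)
    (hnd : (l.map f).Nodup) (i : Nat) (hi : i ∈ l) (hlt : f i < init.length) :
    (l.foldl (fun t i => t.set (f i) (g i)) init)[f i]? = some (g i) := by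
  induction l generalizing init with
  | nil => cases hi
  | cons j l ih =>
    simp only [List.map_cons, List.nodup_cons] at hnd
    rcases List.mem_cons.mp hi with h | h
    · subst h
      rw [List.foldl_cons, pv_foldl_set_untouched _ _ _ _ _ hnd.1,
        List.getElem?_set_self hlt]
    · rw [List.foldl_cons]
      exact ih (init.set (f j) (g j)) hnd.2 h (by simpa using hlt)

theorem pv_int_eq_of_emod_eq {n i j K : Int} (_hn : 0 < n) (hi : 0 ≤ i) (hin : i < n)
    (hj : 0 ≤ j) (hjn : j < n) (h : (i + K) % n = (j + K) % n) : i = j := by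
  have h0 : ((i + K) - (j + K)) % n = 0 := Int.emod_eq_emod_iff_emod_sub_eq_zero.mp h
  have hd : n ∣ i - j := by
    have := Int.dvd_of_emod_eq_zero h0
    simpa using this
  have := Int.eq_zero_of_abs_lt_dvd hd (by rw [abs_lt]; omega)
  omega

def pvF (n : Nat) (K : Int) (i : Nat) : Nat := (PySem.Int.mod ((i : Int) + K) (n : Int)).toNat

theorem pvF_nodup {n : Nat} (hn : 0 < n) (K : Int) : ((List.range n).map (pvF n K)).Nodup := by
  refine List.Nodup.map_on ?_ List.nodup_range
  intro i hi j hj hij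
  simp only [List.mem_range] at hi hj
  have hpos : (0 : Int) < (n : Int) := by exact_mod_cast hn
  unfold pvF at hij
  rw [PySem.Int.mod_eq_emod_of_pos hpos, PySem.Int.mod_eq_emod_of_pos hpos] at hij
  have h1 : 0 ≤ ((i : Int) + K) % (n : Int) := Int.emod_nonneg _ (by omega)
  have h2 : 0 ≤ ((j : Int) + K) % (n : Int) := Int.emod_nonneg _ (by omega)
  have heq : ((i : Int) + K) % (n : Int) = ((j : Int) + K) % (n : Int) := by omega
  have := pv_int_eq_of_emod_eq hpos (i := (i : Int)) (j := (j : Int)) (K := K)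
    (by positivity) (by exact_mod_cast hi) (by positivity) (by exact_mod_cast hj) heq
  exact_mod_cast this

theorem pvF_inv {n : Nat} (hn : 0 < n) (K : Int) (p : Nat) (hp : p < n) :
    pvF n K ((p + (n - (PySem.Int.mod K (n : Int)).toNat)) % n) = p := by
  have hpos : (0 : Int) < (n : Int) := by exact_mod_cast hn
  have hk0 := PySem.Int.mod_nonneg K (b := (n : Int)) hpos
  have hkn := PySem.Int.mod_lt K (b := (n : Int)) hpos
  rw [PySem.Int.mod_eq_emod_of_pos hpos] at hk0 hkn ⊢
  set k : Nat := (K % (n : Int)).toNat with hkdef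
  have hk : (k : Int) = K % (n : Int) := by omega
  have hklt : k < n := by omega
  unfold pvF
  rw [PySem.Int.mod_eq_emod_of_pos hpos]
  have hcast : (((p + (n - k)) % n : Nat) : Int) = ((p : Int) + ((n : Int) - (k : Int))) % (n : Int) := by
    push_cast [Nat.cast_sub hklt.le]
    ring_nf
  rw [hcast, Int.emod_add_emod]
  have harith : (p : Int) + ((n : Int) - (k : Int)) + K = (p : Int) + (n : Int) * (1 + K / (n : Int)) := by
    rw [hk, Int.emod_def]; ring
  rw [harith, Int.add_mul_emod_self_left, Int.emod_eq_of_lt (by positivity) (by exact_mod_cast hp)]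
  omega

-- ===== VERDICT (by name: the statement is the Claim_ definition above) =====
theorem solution_spec : Claim_equal_solution := by
  intro A K _
  unfold Spec_solution solution solution_alt
  by_cases hA : A.length = 0
  · rw [List.length_eq_zero_iff] at hA
    subst hA; rfl
  · simp only [if_neg hA]
    have hn : 0 < A.length := Nat.pos_of_ne_zero hA
    set n := A.length with hndef
    have hpos : (0 : Int) < (n : Int) := by exact_mod_cast hn
    have hk0 := PySem.Int.mod_nonneg K (b := (n : Int)) hpos
    have hkn := PySem.Int.mod_lt K (b := (n : Int)) hpos
    set kI := PySem.Int.mod K (n : Int) with hkI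
    set sN : Nat := n - kI.toNat with hsN
    have hsNle : sN ≤ n := Nat.sub_le _ _
    have hsI : ((n : Int) - kI).toNat = sN := by omega
    have hsnn : (0 : Int) ≤ (n : Int) - kI := by omega
    -- B side: the two slices are drop/take at sN
    rw [PySem.List.slice_from _ hsnn, PySem.List.slice_to _ hsnn, hsI]
    -- A side: identify the fold with the pvF scatter
    have hri : ∀ i ∈ List.range n,
        (((List.range n).map (fun (i : Nat) => PySem.Int.mod ((i : Int) + K) (n : Int))).getD i 0).toNat
          = pvF n K i := by
      intro i hi
      rw [List.mem_range] at hi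
      rw [List.getD_eq_getElem?_getD, List.getElem?_map, List.getElem?_range hi]
      rfl
    have hfold : (List.range n).foldl
        (fun temp i => temp.set
          ((((List.range n).map (fun (i : Nat) => PySem.Int.mod ((i : Int) + K) (n : Int))).getD i 0).toNat)
          (A.getD i 0)) (List.replicate n (0 : Int))
        = (List.range n).foldl (fun temp i => temp.set (pvF n K i) (A.getD i 0))
            (List.replicate n (0 : Int)) := by
      apply PySem.List.foldl_congr_mem
      intro t i hi
      rw [hri i hi]
    rw [hfold]
    -- now prove elementwise equality
    have hlenL : ((List.range n).foldl (fun temp i => temp.set (pvF n K i) (A.getD i 0))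
        (List.replicate n (0 : Int))).length = n := by
      rw [pv_foldl_set_length]; simp
    apply List.ext_getElem?
    intro p
    by_cases hp : p < n
    · set i : Nat := (p + sN) % n with hidef
      have hilt : i < n := Nat.mod_lt _ hn
      have hfi : pvF n K i = p := pvF_inv hn K p hp
      have hLHS : ((List.range n).foldl (fun temp i => temp.set (pvF n K i) (A.getD i 0))
          (List.replicate n (0 : Int)))[p]? = some (A.getD i 0) := by
        rw [← hfi]
        exact pv_foldl_set_hit _ _ _ _ (pvF_nodup hn K) i (List.mem_range.mpr hilt)
          (by rw [List.length_replicate, hfi]; exact hp)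
      rw [hLHS]
      have hgd : A.getD i 0 = A[i]'(by omega) := List.getD_eq_getElem A 0 (by omega)
      by_cases hcase : p < n - sN
      · rw [List.getElem?_append_left (by simp only [List.length_drop, ← hndef]; omega)]
        have hi' : i = sN + p := by
          rw [hidef, Nat.mod_eq_of_lt (by omega)]; omega
        rw [List.getElem?_drop, hgd, List.getElem?_eq_getElem (by omega)]
        simp [hi']
      · rw [List.getElem?_append_right (by simp only [List.length_drop, ← hndef]; omega)]
        have hi' : i = p + sN - n := by
          rw [hidef, Nat.mod_eq_sub_mod (by omega), Nat.mod_eq_of_lt (by omega)]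
        rw [List.getElem?_take]
        have hlt2 : p - (A.drop sN).length < sN := by simp only [List.length_drop, ← hndef]; omega
        have hidx : p - (A.drop sN).length = i := by
          simp only [List.length_drop, ← hndef]; omega
        rw [if_pos hlt2, hidx, hgd, List.getElem?_eq_getElem (by omega)]
    · rw [List.getElem?_eq_none (by rw [hlenL]; omega),
        List.getElem?_eq_none (by
          simp only [List.length_append, List.length_drop, List.length_take, ← hndef]; omega)]
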